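-- pv_equiv track=rewrite | github.com/adamszustak/loans-data | etl/beam_pipeline.py | get_sum_due_and_payment_amount
-- ===== SOURCE A (Python) =====
-- from typing import (
--     Dict,
--     Iterable,
--     Tuple,
--     Union
-- )
--
-- def get_sum_due_and_payment_amount(
--     values: Tuple[int, int],
-- ) -> Tuple[int, int]:
--     paid_amount, loan_amount = 0, 0
--     for row in values:
--         paid_amount += row[0]
--         loan_amount += row[1]
--     return paid_amount, loan_amount
-- ===== SOURCE B (Python) =====
-- def get_sum_due_and_payment_amount(values):
--     rows = list(values)
--     if not rows:
--         return (0, 0)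
--
--     def go(rs):
--         if len(rs) == 1:
--             r = rs[0]
--             return (r[0], r[1])
--         mid = len(rs) // 2
--         p1, l1 = go(rs[:mid])
--         p2, l2 = go(rs[mid:])
--         return (p1 + p2, l1 + l2)
--
--     return go(rows)
-- ===== Notes on version B (the rewrite author's own statement) =====
-- stated objective: alternative
-- what changed: Replaces the single left-to-right accumulating loop with a recursive divide-and-conquer reduction that splits the row list in half, sums each half independently, and combines the two pairs; correct because pairwise integer addition is associative.
import Mathlib
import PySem

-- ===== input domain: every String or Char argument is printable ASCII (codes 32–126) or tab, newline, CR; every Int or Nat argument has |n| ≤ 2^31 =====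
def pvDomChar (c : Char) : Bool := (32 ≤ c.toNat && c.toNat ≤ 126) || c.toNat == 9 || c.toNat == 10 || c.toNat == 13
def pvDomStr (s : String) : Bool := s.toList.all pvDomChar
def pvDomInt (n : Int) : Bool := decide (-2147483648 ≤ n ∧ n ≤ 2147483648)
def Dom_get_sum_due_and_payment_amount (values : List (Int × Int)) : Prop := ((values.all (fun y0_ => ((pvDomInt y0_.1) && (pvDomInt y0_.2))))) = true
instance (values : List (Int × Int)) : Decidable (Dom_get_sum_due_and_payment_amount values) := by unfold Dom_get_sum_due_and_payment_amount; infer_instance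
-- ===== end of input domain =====

-- B replaces A's single accumulating loop with a divide-and-conquer reduction (objective: alternative, not faster).

-- ===== PORT A =====
def get_sum_due_and_payment_amount (values : List (Int × Int)) : Int × Int :=
  values.foldl (fun acc row => (acc.1 + row.1, acc.2 + row.2)) (0, 0)

-- ===== PORT B =====
-- go: split the rows in half, sum each half recursively, combine the two pairs.
def pvAltGo (rs : List (Int × Int)) : Int × Int :=
  match h : rs with
  | [] => (0, 0)        -- unreachable: B's top level handles the empty list
  | [r] => (r.1, r.2)
  | _ :: _ :: _ =>
    let mid := rs.length / 2
    let a := pvAltGo (rs.take mid)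
    let b := pvAltGo (rs.drop mid)
    (a.1 + b.1, a.2 + b.2)
termination_by rs.length
decreasing_by
  · simp [h]; omega
  · simp [h]; omega

def get_sum_due_and_payment_amount_alt (values : List (Int × Int)) : Int × Int :=
  if values.isEmpty then (0, 0) else pvAltGo values

-- ===== PRECONDITION & SPEC =====
def Spec_get_sum_due_and_payment_amount (values : List (Int × Int)) (out : Int × Int) : Prop := out = get_sum_due_and_payment_amount_alt values
instance (values : List (Int × Int)) (out : Int × Int) : Decidable (Spec_get_sum_due_and_payment_amount values out) := by unfold Spec_get_sum_due_and_payment_amount; infer_instance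

-- ===== CLAIM (what is proved, stated in full; the proofs are below) =====
def Claim_equal_get_sum_due_and_payment_amount : Prop := ∀ (values : List (Int × Int)), Dom_get_sum_due_and_payment_amount values → Spec_get_sum_due_and_payment_amount values (get_sum_due_and_payment_amount values)

-- ===== LEMMAS AND PROOFS =====
-- A's foldl computes the pair of column sums.
theorem foldl_pair_sum (values : List (Int × Int)) (a b : Int) :
    values.foldl (fun acc row => (acc.1 + row.1, acc.2 + row.2)) (a, b)
      = (a + (values.map Prod.fst).sum, b + (values.map Prod.snd).sum) := by
  induction values generalizing a b with
  | nil => simp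
  | cons x xs ih => simp [List.foldl, ih]; constructor <;> ring

-- B's divide-and-conquer computes the pair of column sums.
theorem pvAltGo_eq_sum (rs : List (Int × Int)) :
    pvAltGo rs = ((rs.map Prod.fst).sum, (rs.map Prod.snd).sum) := by
  induction hn : rs.length using Nat.strong_induction_on generalizing rs with
  | _ n ih =>
    match h : rs with
    | [] => simp [pvAltGo]
    | [r] => simp [pvAltGo]
    | x :: y :: t =>
      rw [pvAltGo]
      have hL : t.length + 2 = n := by simpa using hn
      have h1 : ((x :: y :: t).take ((x :: y :: t).length / 2)).length < n := by
        simp only [List.length_take, List.length_cons]; omega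
      have h2 : ((x :: y :: t).drop ((x :: y :: t).length / 2)).length < n := by
        simp only [List.length_drop, List.length_cons]; omega
      rw [ih _ h1 _ rfl, ih _ h2 _ rfl]
      conv_rhs => rw [← List.take_append_drop ((x :: y :: t).length / 2) (x :: y :: t)]
      simp

-- ===== VERDICT (by name: the statement is the Claim_ definition above) =====
theorem get_sum_due_and_payment_amount_spec : Claim_equal_get_sum_due_and_payment_amount := by
  intro values _
  unfold Spec_get_sum_due_and_payment_amount get_sum_due_and_payment_amount get_sum_due_and_payment_amount_alt
  rw [foldl_pair_sum]
  by_cases h : values.isEmpty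
  · simp_all [List.isEmpty_iff]
  · simp [h, pvAltGo_eq_sum]
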